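-- pv_equiv track=rewrite | github.com/North-Alex/DiceGame | UserIO.py | formatDice
-- ===== SOURCE A (Python) =====
-- def formatDice(dice):
--     top_row = ""
--     center_row = ""
--     bottom_row = ""
--     hint_row = ""
--     hint_label = 1
--     for d in dice:
--         top_row += "___ "
--         center_row += "|{}| ".format(d)
--         bottom_row += "‾‾‾ "
--         hint_row += "-{}- ".format(hint_label)
--         hint_label += 1
--     return "{}\n{}\n{}\n{}".format(
--         top_row, center_row, bottom_row, hint_row
--     )
-- ===== SOURCE B (Python) =====
-- def formatDice(dice):
--     cells = [["___ ", "|{}| ".format(d), "\u203e\u203e\u203e ", "-{}- ".format(i)]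
--              for i, d in enumerate(dice, 1)]
--     rows = ["".join(row) for row in zip(*cells)] if cells else ["", "", "", ""]
--     return "\n".join(rows)
-- ===== Notes on version B (the rewrite author's own statement) =====
-- stated objective: alternative
-- what changed: B is column-major: it builds one 4-cell block per die (top/center/bottom/hint cells), transposes the list of blocks with zip(*cells), joins each resulting row and joins the rows with newlines, instead of A's single row-major loop accumulating four growing strings and a counter.
import Mathlib
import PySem

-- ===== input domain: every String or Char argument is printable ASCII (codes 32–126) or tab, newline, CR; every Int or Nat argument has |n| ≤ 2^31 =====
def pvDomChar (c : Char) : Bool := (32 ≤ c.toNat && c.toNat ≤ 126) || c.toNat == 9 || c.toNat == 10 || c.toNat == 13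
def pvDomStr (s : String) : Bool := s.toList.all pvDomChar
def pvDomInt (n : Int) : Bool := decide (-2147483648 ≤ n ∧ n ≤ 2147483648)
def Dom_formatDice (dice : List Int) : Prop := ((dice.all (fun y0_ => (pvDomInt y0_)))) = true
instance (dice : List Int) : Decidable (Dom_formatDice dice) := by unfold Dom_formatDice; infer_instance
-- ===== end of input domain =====

-- B is column-major (per-die 4-cell blocks, transposed and joined) instead of A's row-major four-accumulator loop; an alternative decomposition of the same cost.


-- ===== PORT A =====
-- A's loop: four string accumulators plus the hint counter, one fold over the dice.
def formatDice (dice : List Int) : String :=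
  let st := dice.foldl
    (fun (s : List Char × List Char × List Char × List Char × Int) d =>
      (s.1 ++ "___ ".toList,
       s.2.1 ++ ('|' :: PySem.Int.toChars d ++ "| ".toList),
       s.2.2.1 ++ "‾‾‾ ".toList,
       s.2.2.2.1 ++ ('-' :: PySem.Int.toChars s.2.2.2.2 ++ "- ".toList),
       s.2.2.2.2 + 1))
    ([], [], [], [], 1)
  String.ofList (st.1 ++ '\n' :: st.2.1 ++ '\n' :: st.2.2.1 ++ '\n' :: st.2.2.2.1)

-- ===== PORT B =====
-- hand port of zip(*cells): fold zipWith-cons over the blocks; exact for B's use,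
-- where every block has exactly 4 cells (the base row count) and cells is nonempty.
def pvZipStar (cells : List (List (List Char))) : List (List (List Char)) :=
  cells.foldr (fun r acc => List.zipWith (· :: ·) r acc) [[], [], [], []]

-- B: one 4-cell block per die (via enumerate(dice, 1)), zip(*cells) transposes blocks
-- into rows, "".join of each row, then "\n".join of the rows (empty fallback when no cells).
def formatDice_alt (dice : List Int) : String :=
  let cells := (PySem.List.enumerate dice 1).map
    (fun p => ["___ ".toList,
               '|' :: PySem.Int.toChars p.2 ++ "| ".toList,
               "‾‾‾ ".toList,
               '-' :: PySem.Int.toChars p.1 ++ "- ".toList])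
  let rows := if cells.isEmpty then [[], [], [], []]
              else (pvZipStar cells).map (PySem.Chars.join [])
  String.ofList (PySem.Chars.join "\n".toList rows)

-- ===== PRECONDITION & SPEC =====
def Spec_formatDice (dice : List Int) (out : String) : Prop := out = formatDice_alt dice
instance (dice : List Int) (out : String) : Decidable (Spec_formatDice dice out) := by unfold Spec_formatDice; infer_instance

-- ===== CLAIM (what is proved, stated in full; the proofs are below) =====
def Claim_equal_formatDice : Prop := ∀ (dice : List Int), Dom_formatDice dice → Spec_formatDice dice (formatDice dice)

-- ===== LEMMAS AND PROOFS =====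

theorem join_nil_eq_flatten (l : List (List Char)) : PySem.Chars.join [] l = l.flatten := by
  induction l with
  | nil => rfl
  | cons a t ih =>
    cases t with
    | nil => simp [PySem.Chars.join, List.intercalate]
    | cons b u =>
      simp only [PySem.Chars.join, List.intercalate] at *
      simp_all [List.intersperse]

-- transposing a list of 4-cell blocks yields the 4 columns
theorem pvZipStar_quads {α : Type} (f1 f2 f3 f4 : α → List Char) (l : List α) :
    pvZipStar (l.map (fun y => [f1 y, f2 y, f3 y, f4 y]))
      = [l.map f1, l.map f2, l.map f3, l.map f4] := by
  induction l with
  | nil => rfl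
  | cons x t ih => simp [pvZipStar, List.foldr_cons] at *; simp [ih]

-- the generalized loop invariant for A's fold
theorem formatDice_loop (dice : List Int) (t c b h : List Char) (k : Int) :
    dice.foldl
      (fun (s : List Char × List Char × List Char × List Char × Int) d =>
        (s.1 ++ "___ ".toList,
         s.2.1 ++ ('|' :: PySem.Int.toChars d ++ "| ".toList),
         s.2.2.1 ++ "‾‾‾ ".toList,
         s.2.2.2.1 ++ ('-' :: PySem.Int.toChars s.2.2.2.2 ++ "- ".toList),
         s.2.2.2.2 + 1))
      (t, c, b, h, k)
    = (t ++ ((PySem.List.enumerate dice k).map (fun _ => "___ ".toList)).flatten,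
       c ++ ((PySem.List.enumerate dice k).map (fun p => '|' :: PySem.Int.toChars p.2 ++ "| ".toList)).flatten,
       b ++ ((PySem.List.enumerate dice k).map (fun _ => "‾‾‾ ".toList)).flatten,
       h ++ ((PySem.List.enumerate dice k).map (fun p => '-' :: PySem.Int.toChars p.1 ++ "- ".toList)).flatten,
       k + dice.length) := by
  induction dice generalizing t c b h k with
  | nil => simp [PySem.List.enumerate]
  | cons d rest ih =>
    simp only [List.foldl_cons, ih, PySem.List.enumerate_cons, List.map_cons,
      List.flatten_cons, List.length_cons, List.append_assoc, Prod.mk.injEq]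
    refine ⟨trivial, trivial, trivial, trivial, ?_⟩
    push_cast
    ring

-- ===== VERDICT (by name: the statement is the Claim_ definition above) =====
theorem formatDice_spec : Claim_equal_formatDice := by
  intro dice _
  unfold Spec_formatDice formatDice formatDice_alt
  rw [formatDice_loop]
  cases dice with
  | nil => rfl
  | cons d rest =>
    simp only [PySem.List.enumerate_cons]
    rw [show (((1 : Int), d) :: PySem.List.enumerate rest (1 + 1)).map
        (fun p => [("___ ".toList : List Char), '|' :: PySem.Int.toChars p.2 ++ "| ".toList,
          "‾‾‾ ".toList, '-' :: PySem.Int.toChars p.1 ++ "- ".toList])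
      = (((1 : Int), d) :: PySem.List.enumerate rest (1 + 1)).map
        (fun p => [(fun (_ : Int × Int) => ("___ ".toList : List Char)) p,
          (fun (q : Int × Int) => '|' :: PySem.Int.toChars q.2 ++ "| ".toList) p,
          (fun (_ : Int × Int) => ("‾‾‾ ".toList : List Char)) p,
          (fun (q : Int × Int) => '-' :: PySem.Int.toChars q.1 ++ "- ".toList) p]) from rfl,
      pvZipStar_quads]
    have h4 : ∀ a b c e : List Char,
        PySem.Chars.join "\n".toList [a, b, c, e] = a ++ '\n' :: b ++ '\n' :: c ++ '\n' :: e := by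
      intros; simp [PySem.Chars.join, List.intercalate, List.intersperse]
    simp only [List.map_cons, List.isEmpty_cons, Bool.false_eq_true, if_false,
      join_nil_eq_flatten, List.flatten_cons, List.map_const', List.map_nil, List.append_assoc]
    rw [h4]
    simp [List.append_assoc]
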